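-- pv_equiv track=rewrite | github.com/QianheYu/luci-menu-tool | menu_d/applier.py | _detect_close_indent
-- ===== SOURCE A (Python) =====
-- def _detect_close_indent(content: str, close_pos: int) -> str:
--     """Detect the indentation of the closing brace at close_pos."""
--     line_start = content.rfind('\n', 0, close_pos)
--     if line_start == -1:
--         return ''
--     between = content[line_start + 1:close_pos]
--     if all(c in (' ', '\t') for c in between):
--         return between
--     return ''
-- ===== SOURCE B (Python) =====
-- def _detect_close_indent(content: str, close_pos: int) -> str:
--     """Detect the indentation of the closing brace at close_pos."""
--     buf = []
--     for c in reversed(content[:close_pos]):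
--         if c in (' ', '\t'):
--             buf.append(c)
--         elif c == '\n':
--             return ''.join(reversed(buf))
--         else:
--             return ''
--     return ''
-- ===== Notes on version B (the rewrite author's own statement) =====
-- stated objective: alternative
-- what changed: Replaces rfind-for-newline plus slice plus an all() whitespace scan with a single backward scan over the prefix before close_pos that accumulates the indentation and decides directly from the first non-space/tab character it meets (newline vs anything else vs start of string).
import Mathlib
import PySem

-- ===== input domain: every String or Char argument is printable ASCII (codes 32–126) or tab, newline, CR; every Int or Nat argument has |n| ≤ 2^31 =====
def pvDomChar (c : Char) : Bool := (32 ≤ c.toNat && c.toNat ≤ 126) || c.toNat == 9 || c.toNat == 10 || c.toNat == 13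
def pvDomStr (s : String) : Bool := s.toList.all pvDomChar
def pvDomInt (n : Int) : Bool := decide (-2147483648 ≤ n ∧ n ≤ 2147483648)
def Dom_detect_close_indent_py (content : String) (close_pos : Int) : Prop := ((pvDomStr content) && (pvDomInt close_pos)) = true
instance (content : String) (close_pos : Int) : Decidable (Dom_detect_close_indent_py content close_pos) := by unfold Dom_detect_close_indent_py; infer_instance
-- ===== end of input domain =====

-- B replaces rfind+slice+all() with one backward scan over the prefix before close_pos
-- that collects the indentation and decides from the first non-space/tab character it meets.
-- ===== PORT A =====
def detect_close_indent_py (content : String) (close_pos : Int) : String :=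
  let lineStart := PySem.Str.rfindFrom content "\n" 0 (some close_pos)
  if lineStart = -1 then ""
  else
    let between := PySem.Str.slice content (some (lineStart + 1)) (some close_pos)
    if between.toList.all (fun c => c == ' ' || c == '\t') then between else ""

-- ===== PORT B =====
-- backward index loop of Source B, realised as structural recursion on the reversed prefix
def pvGoB : List Char → List Char → String
  | [], _ => ""
  | c :: rest, buf =>
    if c == ' ' || c == '\t' then pvGoB rest (c :: buf)
    else if c == '\n' then String.ofList buf
    else ""

def detect_close_indent_py_alt (content : String) (close_pos : Int) : String :=
  pvGoB ((PySem.Str.slice content none (some close_pos)).toList.reverse) []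

-- ===== PRECONDITION & SPEC =====
def Spec_detect_close_indent_py (content : String) (close_pos : Int) (out : String) : Prop := out = detect_close_indent_py_alt content close_pos
instance (content : String) (close_pos : Int) (out : String) : Decidable (Spec_detect_close_indent_py content close_pos out) := by unfold Spec_detect_close_indent_py; infer_instance

-- ===== CLAIM (what is proved, stated in full; the proofs are below) =====
def Claim_equal_detect_close_indent_py : Prop := ∀ (content : String) (close_pos : Int), Dom_detect_close_indent_py content close_pos → Spec_detect_close_indent_py content close_pos (detect_close_indent_py content close_pos)

-- ===== LEMMAS AND PROOFS =====

-- [c].isPrefixOf xs just asks whether xs starts with c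
theorem pv_isPrefixOf_singleton (c : Char) (xs : List Char) :
    [c].isPrefixOf xs = true ↔ xs.head? = some c := by
  cases xs with
  | nil => simp [List.isPrefixOf]
  | cons x xs =>
    simp only [List.isPrefixOf, List.head?_cons, Option.some.injEq]
    constructor
    · intro h; exact (beq_iff_eq.mp (Bool.and_eq_true_iff.mp h).1).symm
    · intro h; simp [h.symm]

-- characterisation of PySem.Chars.rfind.go for a single-character needle
theorem pv_go_char (p : List Char) (c : Char) (j : Nat) :
    (PySem.Chars.rfind.go p [c] j = -1 ∧ ∀ i ≤ j, p[i]? ≠ some c) ∨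
    (∃ k : Nat, k ≤ j ∧ PySem.Chars.rfind.go p [c] j = (k : Int) ∧ p[k]? = some c ∧
      ∀ i, k < i → i ≤ j → p[i]? ≠ some c) := by
  induction j with
  | zero =>
    by_cases h : [c].isPrefixOf p
    · right
      refine ⟨0, le_refl _, by simp [PySem.Chars.rfind.go, h], ?_, fun i hi hle => by omega⟩
      have := (pv_isPrefixOf_singleton c p).mp h
      simpa [List.head?_eq_getElem?] using this
    · left
      refine ⟨by simp [PySem.Chars.rfind.go, h], ?_⟩
      intro i hi
      interval_cases i
      intro hc
      exact h ((pv_isPrefixOf_singleton c p).mpr (by simpa [List.head?_eq_getElem?] using hc))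
  | succ j ih =>
    have hstep : PySem.Chars.rfind.go p [c] (j + 1) =
        if [c].isPrefixOf (p.drop (j + 1)) = true then ((j : Int) + 1)
        else PySem.Chars.rfind.go p [c] j := by
      simp [PySem.Chars.rfind.go]
    by_cases h : [c].isPrefixOf (p.drop (j + 1)) = true
    · right
      refine ⟨j + 1, le_refl _, by rw [hstep]; simp [h], ?_, fun i hi hle => by omega⟩
      have := (pv_isPrefixOf_singleton c (p.drop (j + 1))).mp h
      simpa [List.head?_drop] using this
    · have hne : p[j + 1]? ≠ some c := by
        intro hc
        exact h ((pv_isPrefixOf_singleton c (p.drop (j + 1))).mpr (by simpa [List.head?_drop] using hc))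
      rcases ih with ⟨h1, h2⟩ | ⟨k, hk, hgo, hkc, hmax⟩
      · left
        refine ⟨by rw [hstep]; simp [h, h1], ?_⟩
        intro i hi
        rcases Nat.lt_or_ge i (j + 1) with hlt | hge
        · exact h2 i (by omega)
        · have : i = j + 1 := by omega
          subst this; exact hne
      · right
        refine ⟨k, by omega, by rw [hstep]; simp [h, hgo], hkc, ?_⟩
        intro i hik hile
        rcases Nat.lt_or_ge i (j + 1) with hlt | hge
        · exact hmax i hik (by omega)
        · have : i = j + 1 := by omega
          subst this; exact hne

theorem pv_rfind_char_neg (p : List Char) (c : Char) :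
    PySem.Chars.rfind p [c] = -1 ↔ ∀ i : Nat, p[i]? ≠ some c := by
  have hgo := pv_go_char p c p.length
  constructor
  · intro h i
    rcases hgo with ⟨h1, h2⟩ | ⟨k, hk, hgo', hkc, hmax⟩
    · rcases Nat.lt_or_ge p.length i with hlt | hge
      · simp [List.getElem?_eq_none (Nat.le_of_lt hlt)]
      · exact h2 i hge
    · rw [PySem.Chars.rfind] at h
      rw [h] at hgo'
      omega
  · intro h
    rcases hgo with ⟨h1, _⟩ | ⟨k, hk, hgo', hkc, _⟩
    · exact h1
    · exact absurd hkc (h k)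

theorem pv_rfind_char_pos (p : List Char) (c : Char)
    (h : PySem.Chars.rfind p [c] ≠ -1) :
    ∃ k : Nat, PySem.Chars.rfind p [c] = (k : Int) ∧ p[k]? = some c ∧
      ∀ i : Nat, k < i → p[i]? ≠ some c := by
  rcases pv_go_char p c p.length with ⟨h1, _⟩ | ⟨k, hk, hgo', hkc, hmax⟩
  · exact absurd h1 (by simpa [PySem.Chars.rfind] using h)
  · refine ⟨k, by simpa [PySem.Chars.rfind] using hgo', hkc, ?_⟩
    intro i hik
    rcases Nat.lt_or_ge p.length i with hlt | hge
    · simp [List.getElem?_eq_none (Nat.le_of_lt hlt)]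
    · exact hmax i hik hge

-- pvGoB in terms of takeWhile / dropWhile
theorem pv_goB_eq (r buf : List Char) :
    pvGoB r buf =
      match r.dropWhile (fun c => c == ' ' || c == '\t') with
      | [] => ""
      | c :: _ => if c = '\n'
          then String.ofList ((r.takeWhile (fun c => c == ' ' || c == '\t')).reverse ++ buf)
          else "" := by
  induction r generalizing buf with
  | nil => simp [pvGoB]
  | cons c rest ih =>
    by_cases hws : (c == ' ' || c == '\t') = true
    · rw [pvGoB, if_pos hws, ih, List.dropWhile_cons, List.takeWhile_cons, if_pos hws, if_pos hws]
      cases hdw : rest.dropWhile (fun c => c == ' ' || c == '\t') with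
      | nil => rfl
      | cons d ds => simp
    · rw [pvGoB, if_neg hws, List.dropWhile_cons, List.takeWhile_cons, if_neg hws, if_neg hws]
      by_cases hnl : c = '\n'
      · simp [hnl]
      · simp [hnl]

-- core: on the prefix p of the text before close_pos, A's rfind/slice/all
-- computation equals B's backward scan
theorem pv_core (p : List Char) :
    (let k := PySem.Chars.rfind p ['\n'];
     if k = -1 then ""
     else if (p.drop (k.toNat + 1)).all (fun c => c == ' ' || c == '\t')
       then String.ofList (p.drop (k.toNat + 1)) else "") =
    pvGoB p.reverse [] := by
  rw [pv_goB_eq]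
  have hdrop : p.reverse.dropWhile (fun c => c == ' ' || c == '\t') =
      (p.rdropWhile (fun c => c == ' ' || c == '\t')).reverse := by
    rw [List.rdropWhile, List.reverse_reverse]
  have htake : p.reverse.takeWhile (fun c => c == ' ' || c == '\t') =
      (p.rtakeWhile (fun c => c == ' ' || c == '\t')).reverse := by
    rw [List.rtakeWhile, List.reverse_reverse]
  set d := p.rdropWhile (fun c => c == ' ' || c == '\t') with hd
  set w := p.rtakeWhile (fun c => c == ' ' || c == '\t') with hwdef
  have hsplit : d ++ w = p := List.rdropWhile_append_rtakeWhile
  have hw : ∀ x ∈ w, (x == ' ' || x == '\t') = true :=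
    fun x hx => List.mem_rtakeWhile_imp (p := fun c => c == ' ' || c == '\t') hx
  by_cases hdnil : d = []
  · have hall : ∀ x ∈ p, (x == ' ' || x == '\t') = true := List.rdropWhile_eq_nil_iff.mp hdnil
    have hno : PySem.Chars.rfind p ['\n'] = -1 := by
      rw [pv_rfind_char_neg]
      intro i hc
      have := hall '\n' (List.mem_of_getElem? hc)
      simp at this
    rw [hdrop, hdnil]
    simp [hno]
  · have hdlast := List.dropLast_append_getLast hdnil
    set c' := d.getLast hdnil with hc'
    have hcws : ¬ (c' == ' ' || c' == '\t') = true := List.rdropWhile_last_not _ p hdnil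
    have hrev : d.reverse = c' :: d.dropLast.reverse := by
      conv_lhs => rw [← hdlast]
      exact List.reverse_concat
    set m := d.dropLast.length with hm
    have hmlen : m + 1 = d.length := by
      rw [hm]
      conv_rhs => rw [← hdlast]
      simp only [List.length_append, List.length_cons, List.length_nil]
    have hdm : d[d.length - 1]? = some c' := by
      rw [← List.getLast?_eq_getElem?]
      exact List.getLast?_eq_some_getLast hdnil
    have hpm : p[m]? = some c' := by
      rw [← hsplit, List.getElem?_append_left (by omega),
        (show m = d.length - 1 by omega)]
      exact hdm
    have hwpart : ∀ i : Nat, m < i → ∀ x : Char, p[i]? = some x → x ∈ w := by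
      intro i hi x hx
      rw [← hsplit, List.getElem?_append_right (by omega)] at hx
      exact List.mem_of_getElem? hx
    rw [hdrop, hrev, htake, List.reverse_reverse]
    show _ = if c' = '\n' then String.ofList (w ++ []) else ""
    by_cases hnl : c' = '\n'
    · -- the last non-space/tab char before close_pos is a newline: both give w
      have hne : PySem.Chars.rfind p ['\n'] ≠ -1 := by
        intro h0
        exact (pv_rfind_char_neg p '\n').mp h0 m (by rw [hpm, hnl])
      obtain ⟨k, hkeq, hkc, hmax⟩ := pv_rfind_char_pos p '\n' hne
      have hkm : k = m := by
        rcases Nat.lt_trichotomy k m with hlt | heq | hgt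
        · exact absurd (by rw [hpm, hnl]) (hmax m hlt)
        · exact heq
        · have := hw '\n' (hwpart k hgt '\n' hkc)
          simp at this
      have hdropw : p.drop (k + 1) = w := by
        rw [← hsplit, (show k + 1 = d.length by omega),
          List.drop_append_of_le_length (le_refl _)]
        simp
      rw [if_pos hnl, hkeq]
      rw [if_neg (by omega : ¬ ((k : Int) = -1))]
      simp only [Int.toNat_natCast, hdropw]
      rw [if_pos (List.all_eq_true.mpr hw), List.append_nil]
    · -- the last non-space/tab char is not a newline: both give ""
      rw [if_neg hnl]
      by_cases hr : PySem.Chars.rfind p ['\n'] = -1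
      · rw [hr, if_pos rfl]
      · obtain ⟨k, hkeq, hkc, hmax⟩ := pv_rfind_char_pos p '\n' hr
        have hkm : k < m := by
          rcases Nat.lt_trichotomy k m with hlt | heq | hgt
          · exact hlt
          · subst heq
            rw [hpm] at hkc
            exact absurd (Option.some_inj.mp hkc) hnl
          · have := hw '\n' (hwpart k hgt '\n' hkc)
            simp at this
        have hmem : c' ∈ p.drop (k + 1) := by
          apply List.mem_of_getElem? (i := m - (k + 1))
          rw [List.getElem?_drop, (show k + 1 + (m - (k + 1)) = m by omega)]
          exact hpm
        have hnall : ¬ (p.drop (k + 1)).all (fun c => c == ' ' || c == '\t') = true := by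
          intro hall
          exact hcws (List.all_eq_true.mp hall c' hmem)
        rw [hkeq, if_neg (by omega : ¬ ((k : Int) = -1))]
        simp only [Int.toNat_natCast]
        rw [if_neg hnall]

-- the rfindFrom call of A searches exactly the prefix up to the clamped close_pos
theorem pv_rfindFrom_take (cs : List Char) (b : Int) :
    PySem.Chars.rfindFrom cs ['\n'] 0 (some b) =
      PySem.Chars.rfind (cs.take (PySem.List.clampIdx cs.length b)) ['\n'] := by
  simp only [PySem.Chars.rfindFrom]
  have hst : ¬ ((0:Int) < 0) := by omega
  simp only [if_neg hst]
  have heq : (if (cs.length:Int) < b then (cs.length:Int)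
      else if b < 0 then (if b + cs.length < 0 then 0 else b + cs.length) else b).toNat
      = PySem.List.clampIdx cs.length b := by
    simp only [PySem.List.clampIdx]
    split_ifs <;> omega
  have hge : 0 ≤ (if (cs.length:Int) < b then (cs.length:Int)
      else if b < 0 then (if b + cs.length < 0 then 0 else b + cs.length) else b) := by
    split_ifs <;> omega
  rw [if_neg (by omega : ¬ (if (cs.length:Int) < b then (cs.length:Int)
      else if b < 0 then (if b + cs.length < 0 then 0 else b + cs.length) else b) < 0)]
  rw [heq]
  simp only [Int.toNat_zero, List.drop_zero]
  by_cases hrr : PySem.Chars.rfind (cs.take (PySem.List.clampIdx cs.length b)) ['\n'] = -1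
  · rw [if_pos hrr, hrr]
  · rw [if_neg hrr, zero_add]

-- B's prefix slice content[:close_pos] is exactly take of the clamped bound
theorem pv_slice_to_clamp (content : String) (b : Int) :
    (PySem.Str.slice content none (some b)).toList
      = content.toList.take (PySem.List.clampIdx content.toList.length b) := by
  rw [PySem.Str.slice, PySem.Chars.slice_eq_listSlice]
  simp [PySem.List.slice, PySem.List.clampIdx]

theorem pv_main (content : String) (close_pos : Int) :
    detect_close_indent_py content close_pos = detect_close_indent_py_alt content close_pos := by
  simp only [detect_close_indent_py, detect_close_indent_py_alt]
  rw [pv_slice_to_clamp]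
  have hnl : ("\n" : String).toList = ['\n'] := by decide
  rw [PySem.Str.rfindFrom, hnl, pv_rfindFrom_take]
  set eN := PySem.List.clampIdx content.toList.length close_pos with heN
  set p := content.toList.take eN with hp
  by_cases hr : PySem.Chars.rfind p ['\n'] = -1
  · rw [if_pos hr, ← pv_core p]
    simp [hr]
  · obtain ⟨k, hkeq, hkc, hmax⟩ := pv_rfind_char_pos p '\n' hr
    have hkp : k < p.length := (List.getElem?_eq_some_iff.mp hkc).1
    have hklen : k < content.toList.length := by
      have h2 : p.length ≤ content.toList.length := by
        rw [hp, List.length_take]; exact Nat.min_le_right ..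
      omega
    have hkeN : k < eN := by
      have : p.length ≤ eN := by rw [hp, List.length_take]; exact Nat.min_le_left ..
      omega
    have hslS : PySem.Str.slice content (some ((k:Int) + 1)) (some close_pos)
        = String.ofList (p.drop (k + 1)) := by
      rw [PySem.Str.slice]
      congr 1
      rw [PySem.Chars.slice_eq_listSlice]
      simp only [PySem.List.slice]
      have hca : PySem.List.clampIdx content.toList.length ((k:Int) + 1) = k + 1 := by
        simp only [PySem.List.clampIdx]
        split_ifs <;> omega
      rw [hca, ← heN, hp, List.drop_take]
    rw [hkeq, if_neg (by omega : ¬ ((k:Int) = -1)), hslS, ← pv_core p, hkeq]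
    rw [if_neg (by omega : ¬ ((k:Int) = -1)), Int.toNat_natCast]
    simp

-- ===== VERDICT (by name: the statement is the Claim_ definition above) =====
theorem detect_close_indent_py_spec : Claim_equal_detect_close_indent_py := by
  intro content close_pos _
  unfold Spec_detect_close_indent_py
  exact pv_main content close_pos
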